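-- pv_equiv track=rewrite | github.com/Tixul/Stargunner | tools/ngpc_tilemap.py | _fmt_u16_rows
-- ===== SOURCE A (Python) =====
-- def _fmt_u16_rows(values: list[int], per_line: int = 12) -> list[str]:
--     out: list[str] = []
--     for i in range(0, len(values), per_line):
--         chunk = values[i : i + per_line]
--         txt = ", ".join("0x%04X" % v for v in chunk)
--         if i + per_line < len(values):
--             txt += ","
--         out.append("    " + txt)
--     return out
-- ===== SOURCE B (Python) =====
-- def _fmt_u16_rows(values: list[int], per_line: int = 12) -> list[str]:
--     rows: list[str] = []
--     buf: list[str] = []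
--     n = len(values)
--     for i, v in enumerate(values):
--         buf.append("0x%04X" % v)
--         if len(buf) == per_line or i == n - 1:
--             row = "    " + ", ".join(buf)
--             if i != n - 1:
--                 row += ","
--             rows.append(row)
--             buf = []
--     return rows
-- ===== Notes on version B (the rewrite author's own statement) =====
-- stated objective: alternative
-- what changed: Replaces the range-stride chunk-and-slice loop with a single streaming pass over enumerate(values) that accumulates formatted tokens in a line buffer and flushes a row when the buffer is full or at the last value.
-- outside the precondition, e.g. on _fmt_u16_rows([1], -1): A returns [], B returns ['    0x0001']; on _fmt_u16_rows([1], 0): A raises ValueError, B returns ['    0x0001']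
import Mathlib
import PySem

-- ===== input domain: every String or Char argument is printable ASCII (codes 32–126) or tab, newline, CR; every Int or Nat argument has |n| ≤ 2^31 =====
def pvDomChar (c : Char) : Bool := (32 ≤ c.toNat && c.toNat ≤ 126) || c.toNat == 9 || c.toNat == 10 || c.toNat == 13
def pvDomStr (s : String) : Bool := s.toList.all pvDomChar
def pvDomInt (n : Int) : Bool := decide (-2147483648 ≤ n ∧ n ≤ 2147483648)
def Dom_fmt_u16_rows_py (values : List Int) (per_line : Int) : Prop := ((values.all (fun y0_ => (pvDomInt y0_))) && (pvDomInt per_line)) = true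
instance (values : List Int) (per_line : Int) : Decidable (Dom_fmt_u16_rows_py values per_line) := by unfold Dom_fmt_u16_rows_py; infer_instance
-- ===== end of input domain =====

-- B replaces A's range-stride chunk-and-slice loop by one streaming pass with a line buffer (alternative decomposition, same cost).


-- ===== PORT A =====
-- shared token formatter: exact port of Python's "0x%04X" % v (zero-pad to width 4; for v < 0 the sign counts into the width)
def pvHexDigit (n : Nat) : Char := if n < 10 then Char.ofNat (48 + n) else Char.ofNat (55 + n)

-- structural (fuel = n) version of the digit loop, so that it evaluates by `decide`; fuel n suffices since n/16 < n
def pvNatHexGo : Nat → Nat → List Char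
  | _, 0 => []
  | 0, _ => []
  | fuel + 1, n => pvNatHexGo fuel (n / 16) ++ [pvHexDigit (n % 16)]

def pvNatHex (n : Nat) : List Char := pvNatHexGo n n

def pvNatHexD (n : Nat) : List Char := if n = 0 then ['0'] else pvNatHex n

def pvFmtHex (v : Int) : String :=
  if 0 ≤ v then
    String.ofList ('0' :: 'x' :: (List.replicate (4 - (pvNatHexD v.toNat).length) '0' ++ pvNatHexD v.toNat))
  else
    String.ofList ('0' :: 'x' :: '-' :: (List.replicate (3 - (pvNatHexD (-v).toNat).length) '0' ++ pvNatHexD (-v).toNat))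

-- loop body of A's for-loop
def pvAStep (values : List Int) (per_line : Int) (out : List String) (i : Int) : List String :=
  let chunk := PySem.List.slice values (some i) (some (i + per_line))
  let txt := PySem.Str.join ", " (chunk.map (fun v => pvFmtHex v))
  let txt := if i + per_line < (values.length : Int) then txt ++ "," else txt
  out ++ ["    " ++ txt]

def fmt_u16_rows_py (values : List Int) (per_line : Int) : List String :=
  (PySem.List.pyRange 0 (values.length : Int) per_line).foldl (pvAStep values per_line) []

-- ===== PORT B =====
-- loop body of B's for-loop over enumerate(values); state = (rows, buf)
def pvBStep (values : List Int) (per_line : Int) (st : List String × List String) (iv : Int × Int) :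
    List String × List String :=
  let buf := st.2 ++ [pvFmtHex iv.2]
  if (buf.length : Int) = per_line ∨ iv.1 = (values.length : Int) - 1 then
    let row := "    " ++ PySem.Str.join ", " buf
    let row := if iv.1 ≠ (values.length : Int) - 1 then row ++ "," else row
    (st.1 ++ [row], [])
  else (st.1, buf)

def fmt_u16_rows_py_alt (values : List Int) (per_line : Int) : List String :=
  ((PySem.List.enumerate values 0).foldl (pvBStep values per_line) ([], [])).1

-- ===== PRECONDITION & SPEC =====
-- Pre_ excludes non-positive per_line: per_line = 0 makes A raise ValueError (range step 0),
-- and for negative per_line A's empty result is an accident of range's step semantics, as defensible as any other.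
def Pre_fmt_u16_rows_py (values : List Int) (per_line : Int) : Prop := 1 ≤ per_line
instance (values : List Int) (per_line : Int) : Decidable (Pre_fmt_u16_rows_py values per_line) := by
  unfold Pre_fmt_u16_rows_py; infer_instance

def pvWitness_fmt_u16_rows_py : List Int × Int := ([0, 1, 65535], 2)

def Spec_fmt_u16_rows_py (values : List Int) (per_line : Int) (out : List String) : Prop :=
  out = fmt_u16_rows_py_alt values per_line
instance (values : List Int) (per_line : Int) (out : List String) : Decidable (Spec_fmt_u16_rows_py values per_line out) := by
  unfold Spec_fmt_u16_rows_py; infer_instance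

-- ===== CLAIM (what is proved, stated in full; the proofs are below) =====
def Claim_equal_fmt_u16_rows_py : Prop := ∀ (values : List Int) (per_line : Int), Dom_fmt_u16_rows_py values per_line → Pre_fmt_u16_rows_py values per_line → Spec_fmt_u16_rows_py values per_line (fmt_u16_rows_py values per_line)
-- ===== LEMMAS AND PROOFS =====

-- common reference shape: rows built chunk by chunk from the token list; chunk size is p + 1
def pvRows (toks : List String) (p : Nat) : List String :=
  match toks with
  | [] => []
  | t :: ts =>
    (if ts.drop p = [] then "    " ++ PySem.Str.join ", " ((t :: ts).take (p + 1))
     else ("    " ++ PySem.Str.join ", " ((t :: ts).take (p + 1))) ++ ",") :: pvRows (ts.drop p) p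
termination_by toks.length
decreasing_by simp

-- functional model of B's loop over the token list
def pvLoopB (rows buf : List String) (toks : List String) (q : Nat) : List String :=
  match toks with
  | [] => rows
  | t :: ts =>
    let buf' := buf ++ [t]
    if buf'.length = q ∨ ts = [] then
      pvLoopB (rows ++ [if ts = [] then "    " ++ PySem.Str.join ", " buf'
                        else ("    " ++ PySem.Str.join ", " buf') ++ ","]) [] ts q
    else pvLoopB rows buf' ts q

lemma pvPyRange_pos_nil (a b s : Int) (hs : 0 < s) (h : b ≤ a) : PySem.List.pyRange a b s = [] := by
  rw [PySem.List.pyRange_of_pos _ _ hs, if_neg (by omega)]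
  simp

lemma pvPyRange_pos_cons (a b s : Int) (hs : 0 < s) (h : a < b) :
    PySem.List.pyRange a b s = a :: PySem.List.pyRange (a + s) b s := by
  rw [PySem.List.pyRange_of_pos _ _ hs, PySem.List.pyRange_of_pos _ _ hs, if_pos h]
  have key : ((b - a + s - 1) / s).toNat
      = (if a + s < b then ((b - (a + s) + s - 1) / s).toNat else 0) + 1 := by
    have h1 : b - a + s - 1 = (b - a - 1) + 1 * s := by ring
    have h2 : (b - a + s - 1) / s = (b - a - 1) / s + 1 := by
      rw [h1, Int.add_mul_ediv_right _ _ (by omega)]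
    have h3 : 0 ≤ (b - a - 1) / s := Int.ediv_nonneg (by omega) (by omega)
    by_cases hab : a + s < b
    · rw [if_pos hab, h2]
      have heq : b - (a + s) + s - 1 = b - a - 1 := by ring
      rw [heq]
      omega
    · rw [if_neg hab, h2]
      have heq : (b - a - 1) / s = 0 := Int.ediv_eq_zero_of_lt (by omega) (by omega)
      omega
  rw [key, List.range_succ_eq_map, List.map_cons, List.map_map]
  congr 1
  · simp
  · apply List.map_congr_left
    intro k _
    simp [Function.comp]
    ring

lemma pvA_loop (values : List Int) (p : Nat) :
    ∀ (m k : Nat) (acc : List String), values.length ≤ k + m →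
      (PySem.List.pyRange (k : Int) (values.length : Int) ((p : Int) + 1)).foldl
          (pvAStep values ((p : Int) + 1)) acc
        = acc ++ pvRows ((values.drop k).map pvFmtHex) p := by
  intro m
  induction m with
  | zero =>
    intro k acc hk
    rw [pvPyRange_pos_nil _ _ _ (by omega) (by exact_mod_cast (by omega : values.length ≤ k)),
        List.drop_eq_nil_of_le (by omega)]
    simp [pvRows]
  | succ m ih =>
    intro k acc hk
    by_cases hlt : k < values.length
    · have hcast : (k : Int) + ((p : Int) + 1) = ((k + p + 1 : Nat) : Int) := by push_cast; ring
      rw [pvPyRange_pos_cons _ _ _ (by omega) (by exact_mod_cast hlt), List.foldl_cons, hcast,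
          ih (k + p + 1) _ (by omega)]
      obtain ⟨v, rest, hvr⟩ : ∃ v rest, values.drop k = v :: rest := by
        cases hd : values.drop k with
        | nil => rw [List.drop_eq_nil_iff] at hd; omega
        | cons v rest => exact ⟨v, rest, rfl⟩
      have hrest : rest = values.drop (k + 1) := by
        have h1 : List.drop 1 (values.drop k) = values.drop (k + 1) := List.drop_drop
        rw [hvr] at h1
        simpa using h1
      have hslice : PySem.List.slice values (some (k : Int)) (some ((k : Int) + ((p : Int) + 1)))
          = (values.drop k).take (p + 1) := by
        have : ((p : Int) + 1) = ((p + 1 : Nat) : Int) := by push_cast; ring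
        rw [this, PySem.List.slice_natCast_add]
      have hdropp : rest.drop p = values.drop (k + p + 1) := by
        rw [hrest, List.drop_drop]; congr 1; omega
      have hcond : ((k : Int) + ((p : Int) + 1) < (values.length : Int)) ↔ k + p + 1 < values.length := by
        rw [hcast]
        exact_mod_cast Iff.rfl
      have hrows : pvRows (List.map pvFmtHex (values.drop k)) p
          = (if values.length ≤ k + p + 1
             then "    " ++ PySem.Str.join ", " (List.map pvFmtHex ((values.drop k).take (p + 1)))
             else ("    " ++ PySem.Str.join ", " (List.map pvFmtHex ((values.drop k).take (p + 1)))) ++ ",")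
            :: pvRows (List.map pvFmtHex (values.drop (k + p + 1))) p := by
        rw [hvr]
        conv_lhs => rw [pvRows.eq_def]
        simp only [List.map_cons]
        rw [← List.map_drop, hdropp]
        congr 1
        have hnil : (List.map pvFmtHex (values.drop (k + p + 1)) = []) ↔ values.length ≤ k + p + 1 := by
          simp [List.drop_eq_nil_iff]
        have htk : List.take (p + 1) (pvFmtHex v :: List.map pvFmtHex rest)
            = List.map pvFmtHex (List.take (p + 1) (v :: rest)) := by
          simp [List.map_take]
        by_cases hc : values.length ≤ k + p + 1
        · rw [if_pos (hnil.mpr hc), if_pos hc, htk]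
        · rw [if_neg (fun hx => hc (hnil.mp hx)), if_neg hc, htk]
      rw [hrows]
      simp only [pvAStep, hslice]
      by_cases hc : k + p + 1 < values.length
      · rw [if_pos (hcond.mpr hc), if_neg (by omega)]
        simp [String.append_assoc]
      · rw [if_neg (fun hx => hc (hcond.mp hx)), if_pos (by omega)]
        simp
    · rw [pvPyRange_pos_nil _ _ _ (by omega) (by exact_mod_cast (by omega : values.length ≤ k)),
          List.drop_eq_nil_of_le (by omega)]
      simp [pvRows]

lemma pvLoopB_chunk (q : Nat) :
    ∀ (toks : List String) (buf rows : List String), toks ≠ [] → buf.length < q →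
      pvLoopB rows buf toks q
        = pvLoopB (rows ++ [if toks.drop (q - buf.length) = []
                            then "    " ++ PySem.Str.join ", " (buf ++ toks.take (q - buf.length))
                            else ("    " ++ PySem.Str.join ", " (buf ++ toks.take (q - buf.length))) ++ ","])
            [] (toks.drop (q - buf.length)) q := by
  intro toks
  induction toks with
  | nil => intro buf rows h _; exact absurd rfl h
  | cons t ts ih =>
    intro buf rows _ hlen
    by_cases hfull : buf.length + 1 = q
    · have hgap : q - buf.length = 1 := by omega
      simp only [pvLoopB, hgap]
      rw [if_pos (Or.inl (by simp [hfull]))]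
      simp
    · by_cases hts : ts = []
      · subst hts
        simp [pvLoopB]
        have h1 : List.drop (q - buf.length) [t] = [] := List.drop_eq_nil_of_le (by simp; omega)
        have h2 : List.take (q - buf.length) [t] = [t] := List.take_of_length_le (by simp; omega)
        rw [h1, h2, if_pos (by omega : 1 ≤ q - buf.length)]
        simp [pvLoopB]
      · simp only [pvLoopB]
        rw [if_neg (by simp [hts]; omega)]
        rw [ih (buf ++ [t]) rows hts (by simp; omega)]
        have hgap : q - buf.length = (q - (buf.length + 1)) + 1 := by omega
        rw [hgap, List.drop_succ_cons, List.take_succ_cons]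
        congr 2 <;> simp

lemma pvLoopB_empty (p : Nat) :
    ∀ (m : Nat) (toks : List String) (rows : List String), toks.length ≤ m →
      pvLoopB rows [] toks (p + 1) = rows ++ pvRows toks p := by
  intro m
  induction m with
  | zero =>
    intro toks rows hm
    have h0 : toks = [] := List.length_eq_zero_iff.mp (by omega)
    subst h0
    simp [pvLoopB, pvRows]
  | succ m ih =>
    intro toks rows hm
    cases toks with
    | nil => simp [pvLoopB, pvRows]
    | cons t ts =>
      rw [pvLoopB_chunk (p + 1) (t :: ts) ([] : List String) rows (by simp) (by simp)]
      have hd : (t :: ts).drop (p + 1 - ([] : List String).length) = ts.drop p := by simp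
      have htake : ([] : List String) ++ (t :: ts).take (p + 1 - ([] : List String).length) = (t :: ts).take (p + 1) := by simp
      rw [hd, htake, ih (ts.drop p) _ (by simp at hm ⊢; omega)]
      conv_rhs => rw [pvRows.eq_def]
      simp

lemma pvB_loop (values : List Int) (per_line : Int) (hp : 0 ≤ per_line) :
    ∀ (suf : List Int) (k : Nat) (rows buf : List String), k + suf.length = values.length →
      ((PySem.List.enumerate suf (k : Int)).foldl (pvBStep values per_line) (rows, buf)).1
        = pvLoopB rows buf (suf.map pvFmtHex) per_line.toNat := by
  intro suf
  induction suf with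
  | nil =>
    intro k rows buf _
    simp [PySem.List.enumerate_nil, pvLoopB]
  | cons v rest ih =>
    intro k rows buf h
    simp only [List.length_cons] at h
    rw [PySem.List.enumerate_cons, List.foldl_cons, List.map_cons]
    have hlast : ((k : Int) = (values.length : Int) - 1) ↔ rest = [] := by
      rw [← List.length_eq_zero_iff]
      constructor <;> intro hx <;> omega
    have hcond : (((buf ++ [pvFmtHex v]).length : Int) = per_line ∨ (k : Int) = (values.length : Int) - 1)
        ↔ ((buf ++ [pvFmtHex v]).length = per_line.toNat ∨ List.map pvFmtHex rest = []) := by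
      rw [hlast, List.map_eq_nil_iff]
      constructor <;> intro hx <;> rcases hx with hx | hx
      · exact Or.inl (by omega)
      · exact Or.inr hx
      · exact Or.inl (by omega)
      · exact Or.inr hx
    conv_rhs => rw [pvLoopB.eq_def]
    simp only []
    by_cases hc : (buf ++ [pvFmtHex v]).length = per_line.toNat ∨ List.map pvFmtHex rest = []
    · rw [show pvBStep values per_line (rows, buf) ((k : Int), v)
          = (rows ++ [if List.map pvFmtHex rest = []
                      then "    " ++ PySem.Str.join ", " (buf ++ [pvFmtHex v])
                      else ("    " ++ PySem.Str.join ", " (buf ++ [pvFmtHex v])) ++ ","], ([] : List String)) from ?_]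
      · rw [show ((k : Int) + 1) = ((k + 1 : Nat) : Int) by push_cast; ring]
        rw [ih (k + 1) _ [] (by omega)]
        rw [if_pos hc]
      · simp only [pvBStep]
        rw [if_pos (hcond.mpr hc)]
        by_cases hr : List.map pvFmtHex rest = []
        · rw [if_pos hr, if_neg (by simp [hlast, List.map_eq_nil_iff.mp hr])]
        · rw [if_neg hr, if_pos (by rw [Ne, hlast]; exact fun hx => hr (by rw [hx]; rfl))]
    · rw [show pvBStep values per_line (rows, buf) ((k : Int), v) = (rows, buf ++ [pvFmtHex v]) from ?_]
      · rw [show ((k : Int) + 1) = ((k + 1 : Nat) : Int) by push_cast; ring]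
        rw [ih (k + 1) _ (buf ++ [pvFmtHex v]) (by omega)]
        rw [if_neg hc]
      · simp only [pvBStep]
        rw [if_neg (fun hx => hc (hcond.mp hx))]

-- ===== VERDICT (by name: the statement is the Claim_ definition above) =====
theorem fmt_u16_rows_py_spec : Claim_equal_fmt_u16_rows_py := by
  intro values per_line _ hpre
  unfold Pre_fmt_u16_rows_py at hpre
  unfold Spec_fmt_u16_rows_py fmt_u16_rows_py fmt_u16_rows_py_alt
  obtain ⟨p, hp⟩ : ∃ p : Nat, per_line = (p : Int) + 1 :=
    ⟨per_line.toNat - 1, by omega⟩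
  subst hp
  have hA := pvA_loop values p values.length 0 [] (by omega)
  rw [Nat.cast_zero, List.drop_zero, List.nil_append] at hA
  have hB := pvB_loop values ((p : Int) + 1) (by omega) values 0 [] [] (by simp)
  rw [show ((0 : Nat) : Int) = (0 : Int) from rfl] at hB
  rw [hA, hB, show ((p : Int) + 1).toNat = p + 1 by omega,
      pvLoopB_empty p (values.map pvFmtHex).length _ _ le_rfl, List.nil_append]
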